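-- pv_equiv track=rewrite | github.com/HEUMMAN/codingTest | programmers/test1.py | solution
-- ===== SOURCE A (Python) =====
-- def solution(id_list, report, k):
--     report = set(report)
--     reported = {}
--     mail_list = {}
--     for id in id_list:
--         mail_list[id] = 0
--
--     answer = []
--
--     make_reported_cases(report, reported)
--
--     reported = {key:value for key, value in reported.items() if value >= k}
--
--
--     make_mails(mail_list, report, reported)
--
--
--     for key, value in mail_list.items():
--         answer.append(value)
--
--     return answer
--
-- def make_mails(mail_list, report, reported):
--     for r in report:
--         if r.split(' ')[1] in reported:
--             mail_list[r.split(' ')[0]] += 1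
--
-- def make_reported_cases(report, reported):
--     for r in report:
--         if r.split(' ')[1] in reported:
--             reported[r.split(' ')[1]] += 1
--         else:
--             reported[r.split(' ')[1]] = 1
-- ===== SOURCE B (Python) =====
-- def solution(id_list, report, k):
--     # group the distinct reports by reported user: reported -> list of reporters
--     groups = {}
--     for r in set(report):
--         parts = r.split(' ')
--         groups.setdefault(parts[1], []).append(parts[0])
--     counts = {i: 0 for i in id_list}
--     for reporters in groups.values():
--         if len(reporters) >= k:
--             for a in reporters:
--                 counts[a] += 1
--     return list(counts.values())
-- ===== Notes on version B (the rewrite author's own statement) =====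
-- stated objective: idiomatic
-- what changed: B parses each distinct report once and groups reporters by reported user in one dict (setdefault/append), then aggregates mail counts in a single pass over the groups, while A builds a count dict, rebuilds it filtered by a dict comprehension, and re-scans and re-splits every report a second time to find the reporters.
import Mathlib
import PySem

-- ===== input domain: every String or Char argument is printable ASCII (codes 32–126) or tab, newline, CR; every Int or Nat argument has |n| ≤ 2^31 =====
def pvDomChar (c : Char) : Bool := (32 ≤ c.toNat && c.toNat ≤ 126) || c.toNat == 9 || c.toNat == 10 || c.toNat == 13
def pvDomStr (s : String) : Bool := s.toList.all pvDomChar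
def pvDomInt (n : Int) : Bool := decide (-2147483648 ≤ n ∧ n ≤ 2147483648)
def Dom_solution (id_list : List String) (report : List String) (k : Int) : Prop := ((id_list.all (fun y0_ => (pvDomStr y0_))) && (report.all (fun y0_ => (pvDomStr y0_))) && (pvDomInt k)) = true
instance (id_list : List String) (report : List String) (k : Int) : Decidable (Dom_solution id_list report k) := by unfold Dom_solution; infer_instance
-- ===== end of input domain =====

-- B restructures A: one grouping pass (reported user -> reporters) instead of A's count dict,
-- filtered dict comprehension and second report scan; equal return values, proved below.
-- Both ports iterate set(report) in first-insertion order (Python: hash order); every value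
-- computed from it is order-independent (counts and a dict only looked up afterwards).

-- shared tokenizer: r.split(' ')[i], with "" where Python raises IndexError (excluded by Pre_)
def pvTok (i : Int) (r : String) : String :=
  PySem.List.pyGetD ((PySem.Str.split? r " ").getD []) i ""

-- ===== PORT A =====
def solution (id_list : List String) (report : List String) (k : Int) : List Int :=
  let reportS : PySem.Set String := PySem.Set.ofList report
  let reported : PySem.Dict String Int :=
    reportS.foldl (fun d r => d.modify (pvTok 1 r) 0 (· + 1)) PySem.Dict.empty
  let mail_list : PySem.Dict String Int :=
    id_list.foldl (fun d id => d.insert id 0) PySem.Dict.empty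
  -- reported = {key: value for key, value in reported.items() if value >= k}
  let reported2 : PySem.Dict String Int :=
    PySem.Dict.mk (reported.items.filter (fun p => decide (k ≤ p.2)))
  -- make_mails: mail_list[r.split(' ')[0]] += 1 (KeyError on absent reporter excluded by Pre_)
  let mail2 : PySem.Dict String Int :=
    reportS.foldl
      (fun d r => if reported2.contains (pvTok 1 r) then d.modify (pvTok 0 r) 0 (· + 1) else d)
      mail_list
  mail2.values

-- ===== PORT B =====
def solution_alt (id_list : List String) (report : List String) (k : Int) : List Int :=
  -- groups.setdefault(parts[1], []).append(parts[0])
  let groups : PySem.Dict String (List String) :=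
    (PySem.Set.ofList report).foldl
      (fun d r => d.modify (pvTok 1 r) [] (· ++ [pvTok 0 r])) PySem.Dict.empty
  let counts0 : PySem.Dict String Int :=
    id_list.foldl (fun d i => d.insert i 0) PySem.Dict.empty
  let counts : PySem.Dict String Int :=
    groups.values.foldl
      (fun d rs => if k ≤ (rs.length : Int) then rs.foldl (fun d a => d.modify a 0 (· + 1)) d else d)
      counts0
  counts.values

-- ===== PRECONDITION & SPEC =====
-- Pre_ excludes exactly the inputs on which Python A raises: (a) a report without a space,
-- on which r.split(' ')[1] raises IndexError; (b) a report whose reported user reaches the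
-- threshold k while the reporter is absent from id_list, on which mail_list[...] raises KeyError.
def Pre_solution (id_list : List String) (report : List String) (k : Int) : Prop :=
  (∀ r ∈ report, 2 ≤ ((PySem.Str.split? r " ").getD []).length) ∧
  (∀ r ∈ report,
    k ≤ (((PySem.Set.ofList report).map (pvTok 1)).count (pvTok 1 r) : Int) →
    pvTok 0 r ∈ id_list)
instance (id_list : List String) (report : List String) (k : Int) : Decidable (Pre_solution id_list report k) := by unfold Pre_solution; infer_instance

def pvWitness_solution : List String × List String × Int :=
  (["muzi", "frodo"], ["muzi frodo"], 1)

def Spec_solution (id_list : List String) (report : List String) (k : Int) (out : List Int) : Prop := out = solution_alt id_list report k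
instance (id_list : List String) (report : List String) (k : Int) (out : List Int) : Decidable (Spec_solution id_list report k out) := by unfold Spec_solution; infer_instance

-- ===== CLAIM (what is proved, stated in full; the proofs are below) =====
def Claim_equal_solution : Prop := ∀ (id_list : List String) (report : List String) (k : Int), Dom_solution id_list report k → Pre_solution id_list report k → Spec_solution id_list report k (solution id_list report k)

-- ===== LEMMAS AND PROOFS =====

-- the Bool "this report's reported user has reached the threshold k among the distinct reports"
def pvQ (report : List String) (k : Int) (r : String) : Bool :=
  decide (k ≤ (((PySem.Set.ofList report).map (pvTok 1)).count (pvTok 1 r) : Int))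

-- a dict built by inserting 0 at every id reads 0 everywhere, and its keys are the distinct ids
theorem pvGetD_insert_zero (l : List String) (d : PySem.Dict String Int) (x : String)
    (h : d.getD x 0 = 0) :
    (l.foldl (fun d i => d.insert i (0 : Int)) d).getD x 0 = 0 := by
  induction l generalizing d with
  | nil => exact h
  | cons a t ih =>
    refine ih (d.insert a 0) ?_
    by_cases hx : x = a
    · subst hx; exact PySem.Dict.getD_insert_self d x 0 0
    · rw [PySem.Dict.getD_insert_of_ne d 0 0 hx]; exact h
theorem pvKeys_insert_zero (id_list : List String) :
    (List.foldl (fun d i => d.insert i (0:Int)) PySem.Dict.empty id_list).keys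
      = PySem.Set.ofList id_list := by
  rw [PySem.Dict.keys_foldl_insert id_list (fun _ _ => 0) PySem.Dict.empty]
  show PySem.Set.update PySem.Set.empty _ = _
  rw [PySem.Set.update_empty]
-- countP splits over a disjoint disjunction
theorem pvCountP_or_disjoint {α : Type} (l : List α) (f g : α → Bool)
    (h : ∀ a ∈ l, ¬(f a = true ∧ g a = true)) :
    l.countP (fun a => f a || g a) = l.countP f + l.countP g := by
  induction l with
  | nil => simp
  | cons a t ih =>
    have ha := h a (List.mem_cons_self ..)
    have ht : ∀ b ∈ t, ¬(f b = true ∧ g b = true) := fun b hb => h b (List.mem_cons_of_mem a hb)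
    rw [List.countP_cons, List.countP_cons, List.countP_cons, ih ht]
    by_cases hf : f a = true <;> by_cases hg : g a = true
    · exact absurd ⟨hf, hg⟩ ha
    all_goals simp [hf, hg] <;> omega
theorem pvSum_countP {β : Type} (K : List String) (hK : K.Nodup)
    (P : List β) (key : β → String) (g : β → Bool) :
    (K.map (fun c => P.countP (fun p => g p && (key p == c)))).sum
      = P.countP (fun p => g p && decide (key p ∈ K)) := by
  induction K with
  | nil => simp
  | cons c K ih =>
    have hc : c ∉ K := (List.nodup_cons.mp hK).1
    have hKn : K.Nodup := (List.nodup_cons.mp hK).2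
    rw [List.map_cons, List.sum_cons, ih hKn]
    rw [show (fun p => g p && decide (key p ∈ c :: K))
        = (fun p => (g p && (key p == c)) || (g p && decide (key p ∈ K))) by
      funext p; by_cases h1 : key p = c <;> simp [h1, hc]]
    rw [pvCountP_or_disjoint]
    intro p _ hpq
    simp only [Bool.and_eq_true, beq_iff_eq, decide_eq_true_eq] at hpq
    exact hc (hpq.1.2 ▸ hpq.2.2)
theorem pvFlatten_count (P : List (String × String)) (K : List String) (hK : K.Nodup)
    (hcov : ∀ p ∈ P, p.1 ∈ K) (w : String → Bool) (i : String) :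
    List.count i (((K.filter w).map
        (fun c => (P.filter (fun p => p.1 == c)).map (fun p => p.2))).flatten)
      = P.countP (fun p => (p.2 == i) && w p.1) := by
  rw [List.count_flatten, List.map_map]
  rw [List.map_congr_left (l := K.filter w)
    (f := List.count i ∘ fun c => (P.filter (fun p => p.1 == c)).map (fun p => p.2))
    (g := fun c => P.countP (fun p => (p.2 == i) && (p.1 == c)))
    (fun c _ => by
      simp only [Function.comp]
      rw [List.count_eq_countP, List.countP_map, List.countP_filter]
      rfl)]
  rw [pvSum_countP (K.filter w) (hK.filter w) P (fun p => p.1) (fun p => p.2 == i)]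
  refine List.countP_congr ?_
  intro p hp
  have := hcov p hp
  by_cases hw : w p.1 = true <;> simp [List.mem_filter, this, hw]

theorem pvSolution_eq (id_list report : List String) (k : Int)
    (hmem : ∀ r ∈ report,
      k ≤ (((PySem.Set.ofList report).map (pvTok 1)).count (pvTok 1 r) : Int) →
      pvTok 0 r ∈ id_list) :
    solution id_list report k
      = (PySem.Set.ofList id_list).map (fun i =>
          (((PySem.Set.ofList report).countP
              (fun r => (pvTok 0 r == i) && pvQ report k r) : Nat) : Int)) := by
  unfold solution
  simp only []
  have hrep : List.foldl (fun d r => d.modify (pvTok 1 r) 0 (· + 1)) PySem.Dict.empty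
      (PySem.Set.ofList report)
      = PySem.Dict.counter ((PySem.Set.ofList report).map (pvTok 1)) := by
    rw [PySem.Dict.counter_eq_foldl, List.foldl_map]
  rw [hrep]
  have hcon : ∀ acc : PySem.Dict String Int, ∀ r ∈ PySem.Set.ofList report,
      (if (PySem.Dict.mk (((PySem.Dict.counter ((PySem.Set.ofList report).map (pvTok 1))).items).filter
            (fun p => decide (k ≤ p.2)))).contains (pvTok 1 r) = true
        then acc.modify (pvTok 0 r) 0 (· + 1) else acc)
      = (if pvQ report k r = true then acc.modify (pvTok 0 r) 0 (· + 1) else acc) := by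
    intro acc r hr
    have hb : pvTok 1 r ∈ PySem.Set.ofList ((PySem.Set.ofList report).map (pvTok 1)) :=
      (PySem.Set.mem_ofList _ _).mpr (List.mem_map_of_mem hr)
    have : (PySem.Dict.mk (((PySem.Dict.counter ((PySem.Set.ofList report).map (pvTok 1))).items).filter
            (fun p => decide (k ≤ p.2)))).contains (pvTok 1 r) = pvQ report k r := by
      rw [PySem.Dict.items_counter, PySem.Dict.contains_mk, List.any_filter, List.any_map]
      rw [Bool.eq_iff_iff]
      simp only [List.any_eq_true, Function.comp, Bool.and_eq_true, decide_eq_true_eq,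
        beq_iff_eq, pvQ]
      constructor
      · rintro ⟨c, _, hk, rfl⟩; exact hk
      · intro hk; exact ⟨pvTok 1 r, hb, hk, rfl⟩
    rw [this]
  rw [PySem.List.foldl_congr_mem _ _ _ _ hcon]
  rw [← List.foldl_filter,
    ← List.foldl_map (f := pvTok 0) (g := fun (d : PySem.Dict String Int) x => d.modify x 0 (· + 1))
      (l := List.filter (pvQ report k) (PySem.Set.ofList report))
      (init := List.foldl (fun d id => d.insert id (0:Int)) PySem.Dict.empty id_list)]
  have hkeys : (List.foldl (fun d x => d.modify x 0 (· + 1))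
      (List.foldl (fun d id => d.insert id (0:Int)) PySem.Dict.empty id_list)
      ((List.filter (fun r => pvQ report k r) (PySem.Set.ofList report)).map (pvTok 0))).keys
      = PySem.Set.ofList id_list := by
    rw [PySem.Dict.keys_foldl_modify _ 0 (fun _ _ v => v + 1) _, pvKeys_insert_zero]
    rw [PySem.Set.update_eq_append_filter]
    have : List.filter (fun y => !PySem.Set.contains (PySem.Set.ofList id_list) y)
        (PySem.Set.ofList ((List.filter (fun r => pvQ report k r) (PySem.Set.ofList report)).map (pvTok 0))) = [] := by
      rw [List.filter_eq_nil_iff]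
      intro y hy
      rw [PySem.Set.mem_ofList] at hy
      obtain ⟨r, hr, rfl⟩ := List.mem_map.mp hy
      have hrS := List.mem_filter.mp hr
      have hq : k ≤ (((PySem.Set.ofList report).map (pvTok 1)).count (pvTok 1 r) : Int) := by
        have := hrS.2; simpa [pvQ] using this
      have hmemr : pvTok 0 r ∈ id_list :=
        hmem r ((PySem.Set.mem_ofList _ _).mp hrS.1) hq
      simp [PySem.Set.contains_eq_listContains, PySem.Set.mem_ofList, hmemr]
    rw [this, List.append_nil]
  rw [PySem.Dict.values_eq_map_keys _ (by rw [hkeys]; exact PySem.Set.nodup_ofList _) 0, hkeys]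
  refine List.map_congr_left ?_
  intro c _
  rw [PySem.Dict.getD_foldl_modify_add_one]
  rw [pvGetD_insert_zero id_list PySem.Dict.empty c (by simp [pysem])]
  rw [List.count_eq_countP, List.countP_map, List.countP_filter]
  simp [Function.comp]


theorem pvSolution_alt_eq (id_list report : List String) (k : Int)
    (hmem : ∀ r ∈ report,
      k ≤ (((PySem.Set.ofList report).map (pvTok 1)).count (pvTok 1 r) : Int) →
      pvTok 0 r ∈ id_list) :
    solution_alt id_list report k
      = (PySem.Set.ofList id_list).map (fun i =>
          (((PySem.Set.ofList report).countP
              (fun r => (pvTok 0 r == i) && pvQ report k r) : Nat) : Int)) := by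
  unfold solution_alt
  simp only []
  have hgr : (List.foldl (fun d r => d.modify (pvTok 1 r) [] fun x => x ++ [pvTok 0 r])
        PySem.Dict.empty (PySem.Set.ofList report))
      = List.foldl (fun d p => d.modify p.1 [] fun x => x ++ [p.2]) PySem.Dict.empty
          ((PySem.Set.ofList report).map (fun r => (pvTok 1 r, pvTok 0 r))) := by
    rw [List.foldl_map]
  rw [hgr]
  have hkg : (List.foldl (fun d p => d.modify p.1 [] fun x => x ++ [p.2]) PySem.Dict.empty
        ((PySem.Set.ofList report).map (fun r => (pvTok 1 r, pvTok 0 r)))).keys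
      = PySem.Set.ofList ((PySem.Set.ofList report).map (pvTok 1)) := by
    rw [PySem.Dict.keys_foldl_modify_key
      ((PySem.Set.ofList report).map (fun r => (pvTok 1 r, pvTok 0 r)))
      (fun (p : String × String) => p.1) []
      (fun (_ : PySem.Dict String (List String)) (p : String × String) (v : List String) => v ++ [p.2])
      PySem.Dict.empty]
    show PySem.Set.update PySem.Set.empty _ = _
    rw [PySem.Set.update_empty, List.map_map]
    rfl
  have hvals : (List.foldl (fun d p => d.modify p.1 [] fun x => x ++ [p.2]) PySem.Dict.empty
        ((PySem.Set.ofList report).map (fun r => (pvTok 1 r, pvTok 0 r)))).values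
      = (PySem.Set.ofList ((PySem.Set.ofList report).map (pvTok 1))).map
          (fun c => (((PySem.Set.ofList report).map (fun r => (pvTok 1 r, pvTok 0 r))).filter
              (fun p => p.1 == c)).map (fun p => p.2)) := by
    rw [PySem.Dict.values_eq_map_keys _ (by rw [hkg]; exact PySem.Set.nodup_ofList _) ([] : List String), hkg]
    refine List.map_congr_left ?_
    intro c _
    rw [PySem.Dict.getD_foldl_modify_append]
    simp [pysem]
  rw [hvals]
  have hif : ∀ acc : PySem.Dict String Int,
      ∀ rs ∈ (PySem.Set.ofList ((PySem.Set.ofList report).map (pvTok 1))).map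
          (fun c => (((PySem.Set.ofList report).map (fun r => (pvTok 1 r, pvTok 0 r))).filter
              (fun p => p.1 == c)).map (fun p => p.2)),
      (if k ≤ (rs.length : Int) then rs.foldl (fun d a => d.modify a 0 (· + 1)) acc else acc)
        = (if decide (k ≤ (rs.length : Int)) = true
            then rs.foldl (fun d a => d.modify a 0 (· + 1)) acc else acc) := by
    intro acc rs _
    by_cases h : k ≤ (rs.length : Int) <;> simp [h]
  rw [PySem.List.foldl_congr_mem _ _ _ _ hif]
  rw [← List.foldl_filter, List.filter_map, ← List.foldl_flatten]
  have hlen : ∀ c : String,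
      (List.map (fun p => p.2) (List.filter (fun p => p.1 == c)
          (List.map (fun r => (pvTok 1 r, pvTok 0 r)) (PySem.Set.ofList report)))).length
        = List.count c (List.map (pvTok 1) (PySem.Set.ofList report)) := by
    intro c
    rw [List.length_map, ← List.countP_eq_length_filter, List.count_eq_countP,
      List.countP_map, List.countP_map]
    rfl
  have hmemFL : ∀ y ∈ (List.map
        (fun c => List.map (fun p => p.2) (List.filter (fun p => p.1 == c)
            (List.map (fun r => (pvTok 1 r, pvTok 0 r)) (PySem.Set.ofList report))))
        (List.filter ((fun rs => decide (k ≤ ((rs.length : Nat) : Int))) ∘ fun c =>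
            List.map (fun p => p.2) (List.filter (fun p => p.1 == c)
              (List.map (fun r => (pvTok 1 r, pvTok 0 r)) (PySem.Set.ofList report))))
          (PySem.Set.ofList ((PySem.Set.ofList report).map (pvTok 1))))).flatten,
      y ∈ id_list := by
    intro y hy
    obtain ⟨l, hl, hyl⟩ := List.mem_flatten.mp hy
    obtain ⟨c, hcK, rfl⟩ := List.mem_map.mp hl
    have hcw := (List.mem_filter.mp hcK).2
    obtain ⟨p, hpP, rfl⟩ := List.mem_map.mp hyl
    have hp1 := (List.mem_filter.mp hpP).2
    obtain ⟨r, hrS, rfl⟩ := List.mem_map.mp (List.mem_filter.mp hpP).1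
    simp only [Function.comp, hlen, decide_eq_true_eq] at hcw
    have hc : pvTok 1 r = c := by simpa using hp1
    refine hmem r ((PySem.Set.mem_ofList _ _).mp hrS) ?_
    rw [hc]
    exact hcw
  have hkeys : (List.foldl (fun d a => d.modify a 0 (· + 1))
      (List.foldl (fun d i => d.insert i (0:Int)) PySem.Dict.empty id_list)
      ((List.map
        (fun c => List.map (fun p => p.2) (List.filter (fun p => p.1 == c)
            (List.map (fun r => (pvTok 1 r, pvTok 0 r)) (PySem.Set.ofList report))))
        (List.filter ((fun rs => decide (k ≤ ((rs.length : Nat) : Int))) ∘ fun c =>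
            List.map (fun p => p.2) (List.filter (fun p => p.1 == c)
              (List.map (fun r => (pvTok 1 r, pvTok 0 r)) (PySem.Set.ofList report))))
          (PySem.Set.ofList ((PySem.Set.ofList report).map (pvTok 1))))).flatten)).keys
      = PySem.Set.ofList id_list := by
    rw [PySem.Dict.keys_foldl_modify _ 0 (fun _ _ v => v + 1) _, pvKeys_insert_zero,
      PySem.Set.update_eq_append_filter]
    have hnil : List.filter (fun y => !PySem.Set.contains (PySem.Set.ofList id_list) y)
        (PySem.Set.ofList ((List.map
        (fun c => List.map (fun p => p.2) (List.filter (fun p => p.1 == c)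
            (List.map (fun r => (pvTok 1 r, pvTok 0 r)) (PySem.Set.ofList report))))
        (List.filter ((fun rs => decide (k ≤ ((rs.length : Nat) : Int))) ∘ fun c =>
            List.map (fun p => p.2) (List.filter (fun p => p.1 == c)
              (List.map (fun r => (pvTok 1 r, pvTok 0 r)) (PySem.Set.ofList report))))
          (PySem.Set.ofList ((PySem.Set.ofList report).map (pvTok 1))))).flatten)) = [] := by
      rw [List.filter_eq_nil_iff]
      intro y hy
      have hyid := hmemFL y ((PySem.Set.mem_ofList _ _).mp hy)
      simp [PySem.Set.contains_eq_listContains, PySem.Set.mem_ofList, hyid]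
    rw [hnil, List.append_nil]
  rw [PySem.Dict.values_eq_map_keys _ (by rw [hkeys]; exact PySem.Set.nodup_ofList _) 0, hkeys]
  refine List.map_congr_left ?_
  intro i _
  rw [PySem.Dict.getD_foldl_modify_add_one,
    pvGetD_insert_zero id_list PySem.Dict.empty i (by simp [pysem])]
  rw [pvFlatten_count ((PySem.Set.ofList report).map (fun r => (pvTok 1 r, pvTok 0 r)))
    (PySem.Set.ofList ((PySem.Set.ofList report).map (pvTok 1)))
    (PySem.Set.nodup_ofList _)
    (fun p hp => by
      obtain ⟨r, hr, rfl⟩ := List.mem_map.mp hp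
      exact (PySem.Set.mem_ofList _ _).mpr (List.mem_map_of_mem hr))
    _ i]
  rw [List.countP_map]
  simp only [Function.comp_def]
  simp only [hlen, pvQ]
  omega

-- ===== VERDICT (by name: the statement is the Claim_ definition above) =====
theorem solution_spec : Claim_equal_solution := by
  intro id_list report k _ hpre
  unfold Spec_solution
  rw [pvSolution_eq id_list report k hpre.2, pvSolution_alt_eq id_list report k hpre.2]
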